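-- pv_equiv track=rewrite | github.com/sgurivir/HindSight | hindsight/analyzers/directory_classifier.py | _remove_redundant_children
-- ===== SOURCE A (Python) =====
-- from typing import Any, Dict, List, Optional, Set, Tuple
--
-- def _remove_redundant_children(exclude_directories: Set[str]) -> Set[str]:
--     """
--     Remove child directories from exclude list if their parent is already excluded.
--
--     Args:
--         exclude_directories: Set of relative paths to exclude
--
--     Returns:
--         Set of relative paths with redundant children removed
--     """
--     # Convert to sorted list for processing (shorter paths first)
--     sorted_excludes = sorted(exclude_directories)
--     result = set()
--
--     for path in sorted_excludes:
--         # Check if any parent of this path is already in the result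
--         is_child_of_excluded = False
--         path_parts = path.split('/')
--
--         # Check all possible parent paths
--         for i in range(1, len(path_parts)):
--             parent_path = '/'.join(path_parts[:i])
--             if parent_path in result:
--                 is_child_of_excluded = True
--                 break
--
--         # Only add if it's not a child of an already excluded directory
--         if not is_child_of_excluded:
--             result.add(path)
--
--     return result
-- ===== SOURCE B (Python) =====
-- def _remove_redundant_children(exclude_directories):
--     """Keep only paths with no ancestor in the set: one pairwise startswith
--     scan per path, no sort-dependent growing result set (sorted() only makes
--     the iteration order deterministic)."""
--     return {p for p in sorted(exclude_directories)
--             if not any(q != p and p.startswith(q + "/") for q in exclude_directories)}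
-- ===== Notes on version B (the rewrite author's own statement) =====
-- stated objective: simpler
-- what changed: Replaces the sort-dependent growing result set with prefix-construction (split/join over all ancestor depths, membership in the result built so far) by a single set comprehension that keeps a path iff no other path in the input is a '/' -boundary ancestor of it, checked by a direct pairwise startswith scan.
import Mathlib
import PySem

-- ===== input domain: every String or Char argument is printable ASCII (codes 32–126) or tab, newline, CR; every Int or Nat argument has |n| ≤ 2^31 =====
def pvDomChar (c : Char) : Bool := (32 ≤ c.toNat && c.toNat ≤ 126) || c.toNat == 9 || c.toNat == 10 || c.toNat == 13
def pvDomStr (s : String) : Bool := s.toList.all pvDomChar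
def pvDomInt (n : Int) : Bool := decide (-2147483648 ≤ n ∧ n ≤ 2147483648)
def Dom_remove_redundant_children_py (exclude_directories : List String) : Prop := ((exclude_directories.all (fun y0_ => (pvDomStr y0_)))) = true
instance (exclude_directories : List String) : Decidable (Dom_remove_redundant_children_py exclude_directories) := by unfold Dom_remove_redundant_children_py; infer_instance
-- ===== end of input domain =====

-- B replaces A's sort-driven growing result set and ancestor reconstruction by split/join
-- with a single comprehension doing a direct pairwise startswith scan (objective: simpler).


-- ===== PORT A =====
-- input/output are Python sets (lists of distinct elements, compared as finite sets);
-- A iterates sorted(input), so its PySem.Set result is built in sorted order.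
def remove_redundant_children_py (exclude_directories : List String) : List String :=
  (PySem.List.sorted exclude_directories (fun x => x) false).foldl
    (fun result path =>
      let path_parts : List String := (PySem.Str.split? path "/").getD []
      let is_child_of_excluded : Bool :=
        (PySem.List.pyRange 1 (path_parts.length : Int) 1).any (fun i =>
          PySem.Set.contains result
            (PySem.Str.join "/" (PySem.List.slice path_parts none (some i))))
      if is_child_of_excluded then result else PySem.Set.add result path)
    PySem.Set.empty

-- ===== PORT B =====
def remove_redundant_children_py_alt (exclude_directories : List String) : List String :=
  PySem.Set.ofList
    ((PySem.List.sorted exclude_directories (fun x => x) false).filter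
      (fun p => !(exclude_directories.any (fun q =>
        decide (q ≠ p) && PySem.Str.startswith p (q ++ "/")))))

-- ===== PRECONDITION & SPEC =====
def Spec_remove_redundant_children_py (exclude_directories : List String) (out : List String) : Prop := out = remove_redundant_children_py_alt exclude_directories
instance (exclude_directories : List String) (out : List String) : Decidable (Spec_remove_redundant_children_py exclude_directories out) := by unfold Spec_remove_redundant_children_py; infer_instance

-- ===== CLAIM (what is proved, stated in full; the proofs are below) =====
def Claim_equal_remove_redundant_children_py : Prop := ∀ (exclude_directories : List String), Dom_remove_redundant_children_py exclude_directories → Spec_remove_redundant_children_py exclude_directories (remove_redundant_children_py exclude_directories)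

-- ===== LEMMAS AND PROOFS =====

def pvAnc (q p : String) : Prop := (q.toList ++ ['/']) <+: p.toList
def pvHasAnc (xs : List String) (p : String) : Prop := ∃ q ∈ xs, pvAnc q p
def pvNoAncB (xs : List String) (p : String) : Bool :=
  !(xs.any (fun q => List.isPrefixOf (q.toList ++ ['/']) p.toList))

theorem pvNoAncB_iff (xs : List String) (p : String) :
    pvNoAncB xs p = true ↔ ¬ pvHasAnc xs p := by
  unfold pvNoAncB pvHasAnc pvAnc
  simp [List.isPrefixOf_iff_prefix]

def pvSplits : List Char → List (List Char)
  | [] => [[]]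
  | c :: r => if c = '/' then [] :: pvSplits r else (pvSplits r).modifyHead (c :: ·)

theorem pvSplits_ne_nil : ∀ cs : List Char, pvSplits cs ≠ []
  | [] => by simp [pvSplits]
  | c :: r => by
    simp only [pvSplits]
    split
    · simp
    · have h := pvSplits_ne_nil r
      cases hh : pvSplits r with
      | nil => exact absurd hh h
      | cons a t => simp [List.modifyHead]

theorem pvGo_eq : ∀ (fuel : Nat) (l cur : List Char) (acc : List (List Char)), l.length < fuel →
    PySem.Chars.splitOn.go ['/'] fuel l cur acc
      = acc.reverse ++ (pvSplits l).modifyHead (fun t => cur.reverse ++ t) := by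
  intro fuel
  induction fuel with
  | zero => intro l cur acc h; omega
  | succ fuel ih =>
    intro l cur acc h
    cases l with
    | nil =>
      rw [PySem.Chars.splitOn.go]
      · simp [pvSplits, List.modifyHead]
      · omega
    | cons c rest =>
      rw [PySem.Chars.splitOn.go]
      by_cases hc : c = '/'
      · subst hc
        have hp : List.isPrefixOf ['/'] ('/' :: rest) = true := by simp [List.isPrefixOf]
        simp only [hp, if_pos, List.length_cons, List.drop_succ_cons, List.length_nil, List.drop_zero]
        rw [ih rest [] (cur.reverse :: acc) (by simpa using Nat.lt_of_succ_lt_succ h)]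
        cases hh : pvSplits rest with
        | nil => exact absurd hh (pvSplits_ne_nil rest)
        | cons a t => simp [pvSplits, hh, List.modifyHead]
      · have hp : List.isPrefixOf ['/'] (c :: rest) = false := by
          simp [List.isPrefixOf]; intro hcc; exact absurd hcc.symm hc
        simp only [hp, Bool.false_eq_true, if_false]
        rw [ih rest (c :: cur) acc (by simpa using Nat.lt_of_succ_lt_succ h)]
        cases hh : pvSplits rest with
        | nil => exact absurd hh (pvSplits_ne_nil rest)
        | cons a t => simp [pvSplits, hh, hc, List.modifyHead]

theorem pvSplitOn_eq (cs : List Char) : PySem.Chars.splitOn cs ['/'] = pvSplits cs := by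
  rw [PySem.Chars.splitOn, pvGo_eq (cs.length + 1) cs [] [] (by omega)]
  cases hh : pvSplits cs with
  | nil => exact absurd hh (pvSplits_ne_nil cs)
  | cons a t => simp [List.modifyHead]

theorem pvInter_step (c : Char) (s0 : List Char) (S' : List (List Char)) (k : Nat) (hk : 1 ≤ k) :
    List.intercalate ['/'] (List.take k ((c :: s0) :: S')) =
      c :: List.intercalate ['/'] (List.take k (s0 :: S')) := by
  obtain ⟨k', rfl⟩ : ∃ k', k = k' + 1 := ⟨k - 1, by omega⟩
  simp only [List.take_succ_cons]
  cases List.take k' S' with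
  | nil => simp [List.intercalate]
  | cons b t => simp [List.intercalate, List.intersperse]

theorem pvInter_cons_nil (s0 : List Char) (S' : List (List Char)) (k : Nat) (hk : 1 ≤ k) :
    List.intercalate ['/'] (List.take (k+1) ([] :: s0 :: S')) =
      '/' :: List.intercalate ['/'] ((s0 :: S').take k) := by
  obtain ⟨k', rfl⟩ : ∃ k', k = k' + 1 := ⟨k - 1, by omega⟩
  simp only [List.take_succ_cons]
  simp [List.intercalate, List.intersperse]

theorem pvCH : ∀ (cs q : List Char),
    (∃ k : Nat, 1 ≤ k ∧ k < (pvSplits cs).length ∧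
      q = List.intercalate ['/'] ((pvSplits cs).take k)) ↔ (q ++ ['/']) <+: cs := by
  intro cs
  induction cs with
  | nil =>
    intro q
    constructor
    · rintro ⟨k, h1, h2, _⟩; simp [pvSplits] at h2; omega
    · intro h
      have := h.length_le
      simp at this
  | cons c rest ih =>
    intro q
    by_cases hc : c = '/'
    · subst hc
      obtain ⟨s0, S', hSs⟩ : ∃ s0 S', pvSplits rest = s0 :: S' := by
        cases h : pvSplits rest with
        | nil => exact absurd h (pvSplits_ne_nil rest)
        | cons a t => exact ⟨a, t, rfl⟩
      have hsplit : pvSplits ('/' :: rest) = [] :: s0 :: S' := by simp [pvSplits, hSs]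
      constructor
      · rintro ⟨k, h1, h2, rfl⟩
        rw [hsplit] at h2 ⊢
        obtain ⟨k', rfl⟩ : ∃ k', k = k' + 1 := ⟨k - 1, by omega⟩
        by_cases hk' : k' = 0
        · subst hk'
          simp [List.intercalate]
        · rw [pvInter_cons_nil s0 S' k' (by omega)]
          refine List.cons_prefix_cons.mpr ⟨rfl, ?_⟩
          exact (ih _).mp ⟨k', by omega, by rw [hSs]; simp at h2 ⊢; omega, by rw [hSs]⟩
      · intro hpre
        cases q with
        | nil =>
          exact ⟨1, le_refl 1, by rw [hsplit]; simp, by rw [hsplit]; simp [List.intercalate]⟩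
        | cons a q' =>
          obtain ⟨ha, hq'⟩ := List.cons_prefix_cons.mp hpre
          subst ha
          obtain ⟨k', hk1, hk2, hq⟩ := (ih q').mpr hq'
          rw [hSs] at hk2 hq
          refine ⟨k' + 1, by omega, by rw [hsplit]; simp at hk2 ⊢; omega, ?_⟩
          rw [hsplit, pvInter_cons_nil s0 S' k' hk1, hq]
    · obtain ⟨s0, S', hSs⟩ : ∃ s0 S', pvSplits rest = s0 :: S' := by
        cases h : pvSplits rest with
        | nil => exact absurd h (pvSplits_ne_nil rest)
        | cons a t => exact ⟨a, t, rfl⟩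
      have hsplit : pvSplits (c :: rest) = (c :: s0) :: S' := by
        simp [pvSplits, hc, hSs, List.modifyHead]
      constructor
      · rintro ⟨k, h1, h2, rfl⟩
        rw [hsplit] at h2 ⊢
        rw [pvInter_step c s0 S' k h1]
        refine List.cons_prefix_cons.mpr ⟨rfl, ?_⟩
        exact (ih _).mp ⟨k, h1, by rw [hSs]; simpa using h2, by rw [hSs]⟩
      · intro hpre
        cases q with
        | nil =>
          exact absurd (by simpa using hpre : ('/' : Char) = c).symm hc
        | cons a q' =>
          obtain ⟨ha, hq'⟩ := List.cons_prefix_cons.mp hpre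
          subst ha
          obtain ⟨k', hk1, hk2, hq⟩ := (ih q').mpr hq'
          rw [hSs] at hk2 hq
          refine ⟨k', hk1, by rw [hsplit]; simpa using hk2, ?_⟩
          rw [hsplit, pvInter_step a s0 S' k' hk1, hq]

theorem pvLex_append (q : List Char) (a : Char) (t : List Char) :
    List.Lex (· < ·) q (q ++ a :: t) := by
  induction q with
  | nil => exact List.Lex.nil
  | cons b q' ih => exact List.Lex.cons ih

theorem pvProperPrefix_lt (q p : String) (h : pvAnc q p) : q < p := by
  rw [String.lt_iff_toList_lt]
  obtain ⟨t, ht⟩ := h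
  rw [← ht, List.append_assoc]
  exact pvLex_append q.toList '/' t

theorem pvAnc_ne (q p : String) (h : pvAnc q p) : q ≠ p := by
  intro he
  subst he
  have := h.length_le
  simp at this

theorem pvAnc_trans (r q p : String) (h1 : pvAnc r q) (h2 : pvAnc q p) : pvAnc r p := by
  unfold pvAnc at *
  exact h1.trans ((q.toList.prefix_append ['/']).trans h2)

theorem pvMinAnc (xs : List String) : ∀ (n : Nat) (q p : String), q.toList.length ≤ n →
    q ∈ xs → pvAnc q p → ∃ q' ∈ xs, pvAnc q' p ∧ ¬ pvHasAnc xs q' := by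
  intro n
  induction n with
  | zero =>
    intro q p hlen hq hanc
    by_cases h : pvHasAnc xs q
    · obtain ⟨r, hr, har⟩ := h
      have hl := har.length_le
      simp only [List.length_append, List.length_cons, List.length_nil] at hl
      omega
    · exact ⟨q, hq, hanc, h⟩
  | succ n ih =>
    intro q p hlen hq hanc
    by_cases h : pvHasAnc xs q
    · obtain ⟨r, hr, har⟩ := h
      have hl := har.length_le
      simp only [List.length_append, List.length_cons, List.length_nil] at hl
      exact ih r p (by omega) hr (pvAnc_trans r q p har hanc)
    · exact ⟨q, hq, hanc, h⟩

theorem pvCheck_eq (xs done l : List String) (p : String)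
    (hsort : (done ++ p :: l).Pairwise (· ≤ ·))
    (hmem : ∀ q, q ∈ done ++ p :: l ↔ q ∈ xs) :
    (∃ q ∈ done.filter (pvNoAncB xs), pvAnc q p) ↔ pvHasAnc xs p := by
  constructor
  · rintro ⟨q, hq, hanc⟩
    have hq' : q ∈ done := (List.mem_filter.mp hq).1
    exact ⟨q, (hmem q).mp (List.mem_append.mpr (Or.inl hq')), hanc⟩
  · rintro ⟨q, hq, hanc⟩
    obtain ⟨q', hq', hanc', hno⟩ := pvMinAnc xs q.toList.length q p le_rfl hq hanc
    have hmem' : q' ∈ done ++ p :: l := (hmem q').mpr hq'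
    have hdone : q' ∈ done := by
      rcases List.mem_append.mp hmem' with h | h
      · exact h
      · exfalso
        rcases List.mem_cons.mp h with rfl | h
        · exact pvAnc_ne q' q' hanc' rfl
        · -- q' ∈ l, so p ≤ q', but q' < p
          have hple : p ≤ q' := by
            have := (List.pairwise_append.mp hsort).2.1
            exact List.rel_of_pairwise_cons this (by assumption)
          exact absurd (pvProperPrefix_lt q' p hanc') (not_lt.mpr hple)
    exact ⟨q', List.mem_filter.mpr ⟨hdone, (pvNoAncB_iff xs q').mpr hno⟩, hanc'⟩

theorem pvIsChild_eq (r : List String) (path : String) :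
    ((PySem.List.pyRange 1 ((((PySem.Str.split? path "/").getD []).length : Int)) 1).any (fun i =>
      PySem.Set.contains r (PySem.Str.join "/"
        (PySem.List.slice ((PySem.Str.split? path "/").getD []) none (some i)))) = true)
    ↔ ∃ q ∈ r, pvAnc q path := by
  have hsep : ("/" : String).toList = ['/'] := rfl
  have hparts : (PySem.Str.split? path "/").getD [] = (pvSplits path.toList).map String.ofList := by
    simp [PySem.Str.split?, PySem.Chars.split?, hsep, pvSplitOn_eq]
  have hval : ∀ k : Nat,
      PySem.Str.join "/" (PySem.List.slice ((pvSplits path.toList).map String.ofList) none (some (k : Int)))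
        = String.ofList (List.intercalate ['/'] ((pvSplits path.toList).take k)) := by
    intro k
    rw [PySem.List.slice_to _ (by omega : (0:Int) ≤ (k : Int))]
    simp [PySem.Str.join, PySem.Chars.join, hsep, List.map_take, List.map_map,
      Function.comp_def, String.toList_ofList]
  rw [hparts, List.any_eq_true]
  constructor
  · rintro ⟨i, hi, hf⟩
    rw [PySem.List.mem_pyRange_one] at hi
    obtain ⟨k, rfl⟩ : ∃ k : Nat, (k : Int) = i := ⟨i.toNat, Int.toNat_of_nonneg (by omega)⟩
    rw [hval k] at hf
    simp only [PySem.Set.contains, List.contains_iff_mem] at hf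
    refine ⟨String.ofList (List.intercalate ['/'] ((pvSplits path.toList).take k)), hf, ?_⟩
    apply (pvCH path.toList _).mp
    refine ⟨k, by omega, by simpa using hi.2, by rw [String.toList_ofList]⟩
  · rintro ⟨q, hq, hanc⟩
    obtain ⟨k, hk1, hk2, hkq⟩ := (pvCH path.toList q.toList).mpr hanc
    refine ⟨(k : Int), ?_, ?_⟩
    · rw [PySem.List.mem_pyRange_one]
      constructor
      · omega
      · simp only [List.length_map]; omega
    · rw [hval k]
      simp only [PySem.Set.contains, List.contains_iff_mem]
      rwa [← hkq, String.ofList_toList]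

theorem pvOfList_snoc (ys : List String) (p : String) :
    PySem.Set.add (PySem.Set.ofList ys) p = PySem.Set.ofList (ys ++ [p]) := by
  rw [PySem.Set.ofList_eq_foldl, PySem.Set.ofList_eq_foldl, List.foldl_append]
  rfl

theorem pvMain (xs : List String) : ∀ (l done : List String),
    (done ++ l).Pairwise (· ≤ ·) →
    (∀ q, q ∈ done ++ l ↔ q ∈ xs) →
    l.foldl
      (fun result path =>
        let path_parts : List String := (PySem.Str.split? path "/").getD []
        let is_child_of_excluded : Bool :=
          (PySem.List.pyRange 1 (path_parts.length : Int) 1).any (fun i =>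
            PySem.Set.contains result
              (PySem.Str.join "/" (PySem.List.slice path_parts none (some i))))
        if is_child_of_excluded then result else PySem.Set.add result path)
      (PySem.Set.ofList (done.filter (pvNoAncB xs)))
      = PySem.Set.ofList ((done ++ l).filter (pvNoAncB xs)) := by
  intro l
  induction l with
  | nil => intro done _ _; simp
  | cons p l' ih =>
    intro done hsort hmem
    rw [List.foldl_cons]
    have hb : ((PySem.List.pyRange 1 ((((PySem.Str.split? p "/").getD []).length : Int)) 1).any (fun i =>
        PySem.Set.contains (PySem.Set.ofList (done.filter (pvNoAncB xs)))
          (PySem.Str.join "/" (PySem.List.slice ((PySem.Str.split? p "/").getD []) none (some i)))) = true)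
        ↔ pvHasAnc xs p := by
      rw [pvIsChild_eq]
      rw [← pvCheck_eq xs done l' p hsort hmem]
      constructor
      · rintro ⟨q, hq, h⟩
        exact ⟨q, (PySem.Set.mem_ofList _ _).mp hq, h⟩
      · rintro ⟨q, hq, h⟩
        exact ⟨q, (PySem.Set.mem_ofList _ _).mpr hq, h⟩
    show List.foldl _ (if _ then _ else _) l' = _
    by_cases hP : pvHasAnc xs p
    · rw [if_pos (hb.mpr hP)]
      have hfe : done.filter (pvNoAncB xs)
          = (done ++ [p]).filter (pvNoAncB xs) := by
        have hf : pvNoAncB xs p = false := by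
          cases h : pvNoAncB xs p
          · rfl
          · exact absurd hP ((pvNoAncB_iff xs p).mp h)
        simp [List.filter_append, hf]
      rw [hfe]
      have := ih (done ++ [p]) (by simpa using hsort) (by intro q; rw [← hmem q]; simp)
      simpa using this
    · rw [if_neg (fun h => hP (hb.mp h))]
      rw [pvOfList_snoc]
      have hfe : done.filter (pvNoAncB xs) ++ [p]
          = (done ++ [p]).filter (pvNoAncB xs) := by
        simp [List.filter_append, (pvNoAncB_iff xs p).mpr hP]
      rw [hfe]
      have := ih (done ++ [p]) (by simpa using hsort) (by intro q; rw [← hmem q]; simp)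
      simpa using this


theorem pvPredB_eq (xs : List String) (p : String) :
    (!(xs.any (fun q => decide (q ≠ p) && PySem.Str.startswith p (q ++ "/"))))
      = pvNoAncB xs p := by
  have hany : (xs.any (fun q => decide (q ≠ p) && PySem.Str.startswith p (q ++ "/")) = true)
      ↔ pvHasAnc xs p := by
    rw [List.any_eq_true]
    unfold pvHasAnc
    refine exists_congr fun q => and_congr_right fun _ => ?_
    rw [Bool.and_eq_true, PySem.Str.startswith_eq, PySem.Chars.startswith_iff,
      String.toList_append]
    unfold pvAnc
    constructor
    · exact fun h => h.2
    · exact fun h => ⟨decide_eq_true (pvAnc_ne q p h), h⟩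
  cases h : xs.any (fun q => decide (q ≠ p) && PySem.Str.startswith p (q ++ "/")) with
  | false =>
    rw [h] at hany
    simp only [Bool.not_false]
    symm
    refine (pvNoAncB_iff xs p).mpr fun hc => ?_
    simp [hc] at hany
  | true =>
    rw [h] at hany
    simp only [Bool.not_true]
    cases h2 : pvNoAncB xs p
    · rfl
    · exact absurd (hany.mp rfl) ((pvNoAncB_iff xs p).mp h2)


-- ===== VERDICT (by name: the statement is the Claim_ definition above) =====
theorem remove_redundant_children_py_spec : Claim_equal_remove_redundant_children_py := by
  intro xs _
  unfold Spec_remove_redundant_children_py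
  unfold remove_redundant_children_py remove_redundant_children_py_alt
  have hmain := pvMain xs (PySem.List.sorted xs (fun x => x) false) []
    (by simpa using PySem.List.sorted_pairwise xs (fun x => x))
    (by intro q; simp [PySem.List.mem_sorted])
  simp only [List.nil_append] at hmain
  rw [show (PySem.Set.empty : PySem.Set String)
      = PySem.Set.ofList (List.filter (pvNoAncB xs) []) from rfl]
  rw [hmain]
  congr 1
  exact (List.filter_congr (fun p _ => (pvPredB_eq xs p))).symm
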